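-- pv_equiv track=rewrite | github.com/Saskapult/graph-rag-testing | process.py | make_pages_chunks
-- ===== SOURCE A (Python) =====
-- def make_pages_chunks(pages, chunk_size=100, spillover=10):
-- 	# The number of words passed at the end of a page
-- 	page_position = []
-- 	cur_count = 0
-- 	for i, page_text in enumerate(pages):
-- 		words = page_text.split()
-- 		cur_count += len(words)
-- 		page_position.append(cur_count)
--
-- 	# Collect (chunk, (st, en))
-- 	chunks_sources = []
-- 	words = [word for page in pages for word in page.split()]
-- 	i = 0
-- 	while True:
-- 		segment = words[i:(i+chunk_size)]
--
-- 		def find_page(word_i):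
-- 			page = 0
-- 			while page_position[page] <= word_i:
-- 				page += 1
-- 				if page >= len(page_position):
-- 					break
-- 			return page
--
-- 		st = find_page(i)
-- 		en = find_page(i + len(segment))
--
-- 		# Splitting by words does lose whitespace information
-- 		# Impact unknown
-- 		chunks_sources.append((
-- 			" ".join(segment),
-- 			(st, en)
-- 		))
--
-- 		i += len(segment)
-- 		if i < len(words):
-- 			i -= spillover
-- 		else:
-- 			break
--
-- 	return chunks_sources
-- ===== SOURCE B (Python) =====
-- def make_pages_chunks(pages, chunk_size=100, spillover=10):
-- 	# One pass builds the flat word list and the cumulative word-count per page;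
-- 	# page spans are then found by binary search instead of a linear scan per chunk.
-- 	words = []
-- 	cum = []
-- 	for page in pages:
-- 		words.extend(page.split())
-- 		cum.append(len(words))
-- 	n = len(words)
--
-- 	def page_of(word_i):
-- 		# bisect_right(cum, word_i), hand-written (no imports in this module)
-- 		lo, hi = 0, len(cum)
-- 		while lo < hi:
-- 			mid = (lo + hi) // 2
-- 			if cum[mid] <= word_i:
-- 				lo = mid + 1
-- 			else:
-- 				hi = mid
-- 		return lo
--
-- 	out = []
-- 	i = 0
-- 	step = chunk_size - spillover
-- 	while step > 0 and chunk_size > 0 and i + chunk_size < n: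
-- 		out.append((" ".join(words[i:i + chunk_size]),
-- 			(page_of(i), page_of(i + chunk_size))))
-- 		i += step
-- 	tail = words[i:]
-- 	out.append((" ".join(tail), (page_of(i), page_of(i + len(tail)))))
-- 	return out
-- ===== Notes on version B (the rewrite author's own statement) =====
-- stated objective: faster
-- what changed: B builds the flat word list and cumulative per-page word counts in one pass and finds each chunk's page span by binary search over the cumulative counts, replacing A's re-splitting of all pages and per-chunk linear find_page scan from page 0.
-- outside the precondition, e.g. on make_pages_chunks(['z'], -4, -1): A returns [('', (0, 0)), ('', (1, 1))], B returns [('z', (0, 1))]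
import Mathlib
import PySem

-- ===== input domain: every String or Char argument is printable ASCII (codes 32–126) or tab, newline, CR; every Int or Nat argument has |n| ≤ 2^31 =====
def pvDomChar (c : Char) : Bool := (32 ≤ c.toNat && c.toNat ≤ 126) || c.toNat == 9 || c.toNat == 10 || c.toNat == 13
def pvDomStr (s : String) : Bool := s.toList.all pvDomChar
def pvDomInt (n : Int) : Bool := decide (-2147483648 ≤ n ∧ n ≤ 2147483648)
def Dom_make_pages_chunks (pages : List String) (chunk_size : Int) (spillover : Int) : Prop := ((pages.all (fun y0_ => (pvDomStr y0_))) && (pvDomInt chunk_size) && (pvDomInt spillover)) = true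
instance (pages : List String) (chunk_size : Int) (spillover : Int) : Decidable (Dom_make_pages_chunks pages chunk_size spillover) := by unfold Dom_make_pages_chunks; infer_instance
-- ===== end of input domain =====

-- B replaces A's per-chunk linear find_page scan by a binary search over the cumulative
-- word counts (built in the same single pass as the flat word list); objective: faster.

-- ===== PORT A =====

-- find_page: page = 0; while page_position[page] <= word_i: page += 1; if page >= len: break
-- fuel = pp.length + 1 is enough: page only increases and the loop stops at pp.length.
def pvA_findPage (pp : List Int) (w : Int) (page : Int) (fuel : Nat) : Int :=
  match fuel with
  | 0 => page
  | f + 1 =>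
    match PySem.List.pyGet? pp page with
    | none => page      -- IndexError in Python: only reachable with pp = [], excluded by Pre_
    | some v =>
      if v ≤ w then
        if page + 1 ≥ (pp.length : Int) then page + 1
        else pvA_findPage pp w (page + 1) f
      else page

-- the 'while True' chunking loop of A; fuel = words.length + 1 is enough under Pre_
-- (each continuing iteration increases i by chunk_size - spillover ≥ 1)
def pvA_loop (words : List String) (pp : List Int) (chunk_size spillover : Int)
    (i : Int) (acc : List (String × (Int × Int))) (fuel : Nat) : List (String × (Int × Int)) :=
  match fuel with
  | 0 => acc
  | f + 1 =>
    let segment := PySem.List.slice words (some i) (some (i + chunk_size))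
    let st := pvA_findPage pp i 0 (pp.length + 1)
    let en := pvA_findPage pp (i + (segment.length : Int)) 0 (pp.length + 1)
    let acc' := acc ++ [(PySem.Str.join " " segment, (st, en))]
    let i' := i + (segment.length : Int)
    if i' < (words.length : Int) then
      pvA_loop words pp chunk_size spillover (i' - spillover) acc' f
    else acc'

def make_pages_chunks (pages : List String) (chunk_size : Int) (spillover : Int) : List (String × (Int × Int)) :=
  let pp := (pages.foldl (fun (st : Int × List Int) page =>
      (st.1 + ((PySem.Str.split₀ page).length : Int),
       st.2 ++ [st.1 + ((PySem.Str.split₀ page).length : Int)])) (0, [])).2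
  let words := pages.flatMap (fun page => PySem.Str.split₀ page)
  pvA_loop words pp chunk_size spillover 0 [] (words.length + 1)

-- ===== PORT B =====

-- hand-written bisect_right of Source B: lo, hi = 0, len(a); while lo < hi: …
def pvB_bisect (a : List Int) (x : Int) (lo hi : Int) : Int :=
  if h : lo < hi then
    let mid := PySem.Int.floordiv (lo + hi) 2
    match PySem.List.pyGet? a mid with
    | none => lo    -- unreachable for the calls Source B makes (0 ≤ lo < hi ≤ len a)
    | some v => if v ≤ x then pvB_bisect a x (mid + 1) hi else pvB_bisect a x lo mid
  else lo
termination_by (hi - lo).toNat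
decreasing_by
  · have h3 := PySem.Int.le_floordiv_iff_mul_le (a := lo + hi) (b := 2) (q := lo) (by omega)
    omega
  · have h2 := PySem.Int.floordiv_lt_iff_lt_mul (a := lo + hi) (b := 2) (q := hi) (by omega)
    have h3 := PySem.Int.le_floordiv_iff_mul_le (a := lo + hi) (b := 2) (q := lo) (by omega)
    omega

-- Source B main loop: while step > 0 and chunk_size > 0 and i + chunk_size < n: … ; then the tail chunk
def pvB_loop (words : List String) (cum : List Int) (chunk_size spillover : Int)
    (i : Int) (acc : List (String × (Int × Int))) : List (String × (Int × Int)) :=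
  if h : chunk_size - spillover > 0 ∧ chunk_size > 0 ∧ i + chunk_size < (words.length : Int) then
    pvB_loop words cum chunk_size spillover (i + (chunk_size - spillover))
      (acc ++ [(PySem.Str.join " " (PySem.List.slice words (some i) (some (i + chunk_size))),
        (pvB_bisect cum i 0 (cum.length : Int), pvB_bisect cum (i + chunk_size) 0 (cum.length : Int)))])
  else
    let tail := PySem.List.slice words (some i) none
    acc ++ [(PySem.Str.join " " tail,
      (pvB_bisect cum i 0 (cum.length : Int), pvB_bisect cum (i + (tail.length : Int)) 0 (cum.length : Int)))]
termination_by ((words.length : Int) - i).toNat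
decreasing_by omega

def make_pages_chunks_alt (pages : List String) (chunk_size : Int) (spillover : Int) : List (String × (Int × Int)) :=
  let wc := pages.foldl (fun (st : List String × List Int) page =>
      (st.1 ++ PySem.Str.split₀ page,
       st.2 ++ [((st.1 ++ PySem.Str.split₀ page).length : Int)])) ([], [])
  pvB_loop wc.1 wc.2 chunk_size spillover 0 []

-- ===== PRECONDITION & SPEC =====
-- Pre_ excludes: pages = [] (A raises IndexError); parameter combinations on which A never
-- terminates (chunk_size ≤ 0 with words present, or spillover ≥ chunk_size < word count);
-- and the remaining nonpositive chunk_size inputs (spillover < 0), outside the natural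
-- domain, where A returns a run of empty chunks by negative-slice stepping.
def Pre_make_pages_chunks (pages : List String) (chunk_size : Int) (spillover : Int) : Prop :=
  pages ≠ [] ∧
    (pages.flatMap (fun page => PySem.Str.split₀ page) = [] ∨
      (0 < chunk_size ∧ (spillover < chunk_size ∨
        ((pages.flatMap (fun page => PySem.Str.split₀ page)).length : Int) ≤ chunk_size)))
instance (pages : List String) (chunk_size : Int) (spillover : Int) : Decidable (Pre_make_pages_chunks pages chunk_size spillover) := by unfold Pre_make_pages_chunks; infer_instance

def pvWitness_make_pages_chunks : List String × Int × Int := (["a b c", "d"], 2, 1)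

def Spec_make_pages_chunks (pages : List String) (chunk_size : Int) (spillover : Int) (out : List (String × (Int × Int))) : Prop := out = make_pages_chunks_alt pages chunk_size spillover
instance (pages : List String) (chunk_size : Int) (spillover : Int) (out : List (String × (Int × Int))) : Decidable (Spec_make_pages_chunks pages chunk_size spillover out) := by unfold Spec_make_pages_chunks; infer_instance

-- ===== CLAIM (what is proved, stated in full; the proofs are below) =====
def Claim_equal_make_pages_chunks : Prop := ∀ (pages : List String) (chunk_size : Int) (spillover : Int), Dom_make_pages_chunks pages chunk_size spillover → Pre_make_pages_chunks pages chunk_size spillover → Spec_make_pages_chunks pages chunk_size spillover (make_pages_chunks pages chunk_size spillover)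

-- ===== LEMMAS AND PROOFS =====

-- the common evaluation of both page lookups: length of the ≤-prefix of pp
def pvPrefixLen (pp : List Int) (w : Int) : Int :=
  ((pp.takeWhile (fun v => decide (v ≤ w))).length : Int)

lemma pvA_findPage_eq (pp : List Int) (w : Int) :
    ∀ (fuel page : Nat), pp.length - page + 1 ≤ fuel →
      pvA_findPage pp w (page : Int) fuel =
        (page : Int) + (((pp.drop page).takeWhile (fun v => decide (v ≤ w))).length : Int) := by
  intro fuel
  induction fuel with
  | zero => intro page h; omega
  | succ f ih =>
    intro page h
    rw [pvA_findPage, PySem.List.pyGet?_natCast]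
    by_cases hlt : page < pp.length
    · rw [List.getElem?_eq_getElem hlt]
      rw [List.drop_eq_getElem_cons hlt, List.takeWhile_cons]
      by_cases hle : pp[page] ≤ w
      · simp only [hle, decide_true, if_pos]
        by_cases hlast : page + 1 ≥ pp.length
        · have hlen : pp.length = page + 1 := by omega
          have hnil : pp.drop (page + 1) = [] := List.drop_eq_nil_of_le (by omega)
          simp only [hnil, List.takeWhile_nil]
          rw [if_pos (by exact_mod_cast by omega)]
          simp
        · rw [if_neg (by omega)]
          have : ((page : Int) + 1) = ((page + 1 : Nat) : Int) := by push_cast; ring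
          rw [this, ih (page + 1) (by omega)]
          simp; ring
      · simp [hle]
    · rw [List.getElem?_eq_none (by omega)]
      have hnil : pp.drop page = [] := List.drop_eq_nil_of_le (by omega)
      simp [hnil]


lemma pv_tw_false (p : Int → Bool) : ∀ (l : List Int), ∀ (h : (l.takeWhile p).length < l.length), p (l[(l.takeWhile p).length]) = false := by
  intro l
  induction l with
  | nil => intro h; simp at h
  | cons a t ih =>
    intro h
    by_cases hpa : p a = true
    · simp only [List.takeWhile_cons, hpa, if_pos] at h ⊢
      simpa using ih (by simpa using h)
    · simp only [List.takeWhile_cons, hpa] at h ⊢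
      simp [Bool.not_eq_true] at hpa ⊢
      simpa using hpa

lemma pv_tw_true (l : List Int) (p : Int → Bool) (k : Nat) (h : k < (l.takeWhile p).length) (h2 : k < l.length) : p (l[k]) = true := by
  have hpre : (l.takeWhile p)[k] = l[k] := List.IsPrefix.getElem (List.takeWhile_prefix p) h
  exact hpre ▸ List.mem_takeWhile_imp (List.getElem_mem h)

lemma pvB_bisect_eq (a : List Int) (x : Int) (hsort : a.Pairwise (· ≤ ·)) :
    ∀ (k : Nat) (lo hi : Int), (hi - lo).toNat = k → 0 ≤ lo → hi ≤ (a.length : Int) →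
      lo ≤ pvPrefixLen a x → pvPrefixLen a x ≤ hi →
      pvB_bisect a x lo hi = pvPrefixLen a x := by
  intro k
  induction k using Nat.strong_induction_on with
  | _ k ih =>
    intro lo hi hk h0 hhi hloF hFhi
    rw [pvB_bisect]
    by_cases hlh : lo < hi
    · rw [dif_pos hlh]
      have hmlo : lo ≤ PySem.Int.floordiv (lo + hi) 2 :=
        (PySem.Int.le_floordiv_iff_mul_le (by omega)).mpr (by omega)
      have hmhi : PySem.Int.floordiv (lo + hi) 2 < hi :=
        (PySem.Int.floordiv_lt_iff_lt_mul (by omega)).mpr (by omega)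
      obtain ⟨m, hm⟩ : ∃ m : Nat, (m : Int) = PySem.Int.floordiv (lo + hi) 2 :=
        ⟨(PySem.Int.floordiv (lo + hi) 2).toNat, Int.toNat_of_nonneg (by omega)⟩
      have hmlt : m < a.length := by omega
      simp only [← hm, PySem.List.pyGet?_natCast, List.getElem?_eq_getElem hmlt]
      by_cases hvx : a[m] ≤ x
      · rw [if_pos hvx]
        have hF : (m : Int) + 1 ≤ pvPrefixLen a x := by
          unfold pvPrefixLen
          by_contra hcon
          have hF0 : (a.takeWhile (fun v => decide (v ≤ x))).length ≤ m := by omega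
          have hF0len : (a.takeWhile (fun v => decide (v ≤ x))).length < a.length := by omega
          have hfalse := pv_tw_false (fun v => decide (v ≤ x)) a hF0len
          rcases Nat.eq_or_lt_of_le hF0 with heq | hlt
          · simp only [heq] at hfalse; simp [hvx] at hfalse
          · have hle := List.pairwise_iff_getElem.mp hsort _ m hF0len hmlt hlt
            simp at hfalse; omega
        exact ih (hi - ((m : Int) + 1)).toNat (by omega) _ hi rfl (by omega) hhi (by omega) hFhi
      · rw [if_neg hvx]
        have hF : pvPrefixLen a x ≤ (m : Int) := by
          unfold pvPrefixLen
          by_contra hcon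
          have hmF : m < (a.takeWhile (fun v => decide (v ≤ x))).length := by omega
          have htrue := pv_tw_true a (fun v => decide (v ≤ x)) m hmF hmlt
          simp [hvx] at htrue
        exact ih ((m : Int) - lo).toNat (by omega) lo _ rfl h0 (by omega) hloF hF
    · rw [dif_neg hlh]; omega

lemma pv_loop_eq (words : List String) (pp : List Int) (c s : Int)
    (hsort : pp.Pairwise (· ≤ ·))
    (hcond : words = [] ∨ (0 < c ∧ (s < c ∨ (words.length : Int) ≤ c))) :
    ∀ (fuel : Nat) (i : Int) (acc : List (String × (Int × Int))), 0 ≤ i →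
      ((words.length : Int) - i).toNat + 1 ≤ fuel →
      pvA_loop words pp c s i acc fuel = pvB_loop words pp c s i acc := by
  intro fuel
  induction fuel with
  | zero => intro i acc h0 hf; omega
  | succ f ih =>
    intro i acc h0 hf
    have hq : ∀ w : Int, pvA_findPage pp w 0 (pp.length + 1) = pvPrefixLen pp w := by
      intro w
      have h := pvA_findPage_eq pp w (pp.length + 1) 0 (by omega)
      simpa [pvPrefixLen] using h
    have hb : ∀ w : Int, pvB_bisect pp w 0 (pp.length : Int) = pvPrefixLen pp w := by
      intro w
      refine pvB_bisect_eq pp w hsort _ 0 _ rfl (le_refl _) (le_refl _) ?_ ?_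
      · unfold pvPrefixLen; exact_mod_cast Nat.zero_le _
      · unfold pvPrefixLen; exact_mod_cast (List.takeWhile_prefix _).length_le
    rw [pvB_loop]
    by_cases hG : c - s > 0 ∧ c > 0 ∧ i + c < (words.length : Int)
    · rw [dif_pos hG]
      obtain ⟨hG1, hG2, hG3⟩ := hG
      have hseg : (PySem.List.slice words (some i) (some (i + c))).length = c.toNat := by
        rw [PySem.List.slice_toNat _ h0 (by omega)]
        rw [List.length_take, List.length_drop]
        omega
      have hsegInt : ((PySem.List.slice words (some i) (some (i + c))).length : Int) = c := by
        rw [hseg]; omega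
      simp only [pvA_loop, hsegInt, hq, hb]
      rw [if_pos (by omega)]
      have harg : i + c - s = i + (c - s) := by ring
      rw [harg, ih (i + (c - s)) _ (by omega) (by omega)]
    · rw [dif_neg hG]
      rcases hcond with hnil | ⟨hc, hcs⟩
      · subst hnil
        have hseg : PySem.List.slice ([] : List String) (some i) (some (i + c)) = [] := by
          have hl := PySem.List.length_slice ([] : List String) i (i + c)
          refine List.eq_nil_of_length_eq_zero ?_
          rw [hl]; unfold PySem.List.clampIdx; simp only [List.length_nil, Nat.cast_zero]; split_ifs <;> omega
        have htail : PySem.List.slice ([] : List String) (some i) none = [] := by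
          rw [PySem.List.slice_from _ h0]; simp
        simp only [pvA_loop, hseg, htail, hq, hb, List.length_nil, Nat.cast_zero, add_zero]
        rw [if_neg (by omega)]
      · have hicn : (words.length : Int) ≤ i + c := by
          rcases hcs with hsc | hnc <;> omega
        have htail : PySem.List.slice words (some i) none = words.drop i.toNat := PySem.List.slice_from _ h0
        have hseg : PySem.List.slice words (some i) (some (i + c)) = words.drop i.toNat := by
          rw [PySem.List.slice_toNat _ h0 (by omega)]
          apply List.take_of_length_le
          rw [List.length_drop]; omega
        have hlen : ((words.drop i.toNat).length : Int) = max ((words.length : Int) - i) 0 := by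
          rw [List.length_drop]; omega
        simp only [pvA_loop, hseg, htail, hq, hb]
        rw [if_neg (by omega)]
  

lemma pv_fold_eq (pages : List String) :
    ∀ (ws : List String) (cs : List Int),
      (pages.foldl (fun (st : Int × List Int) page =>
          (st.1 + ((PySem.Str.split₀ page).length : Int),
           st.2 ++ [st.1 + ((PySem.Str.split₀ page).length : Int)])) ((ws.length : Int), cs)).2 =
        (pages.foldl (fun (st : List String × List Int) page =>
          (st.1 ++ PySem.Str.split₀ page,
           st.2 ++ [((st.1 ++ PySem.Str.split₀ page).length : Int)])) (ws, cs)).2 ∧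
      (pages.foldl (fun (st : List String × List Int) page =>
          (st.1 ++ PySem.Str.split₀ page,
           st.2 ++ [((st.1 ++ PySem.Str.split₀ page).length : Int)])) (ws, cs)).1 =
        ws ++ pages.flatMap (fun page => PySem.Str.split₀ page) := by
  intro ws cs
  induction pages generalizing ws cs with
  | nil => simp
  | cons p t ih =>
    simp only [List.foldl_cons, List.flatMap_cons]
    have hlen : (ws.length : Int) + ((PySem.Str.split₀ p).length : Int) =
        ((ws ++ PySem.Str.split₀ p).length : Int) := by
      push_cast [List.length_append]; ring
    rw [hlen]
    obtain ⟨ih1, ih2⟩ := ih (ws ++ PySem.Str.split₀ p)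
      (cs ++ [((ws ++ PySem.Str.split₀ p).length : Int)])
    exact ⟨ih1, by rw [ih2, List.append_assoc]⟩

lemma pv_fold_sorted (pages : List String) :
    ∀ (ws : List String) (cs : List Int),
      (∀ x ∈ cs, x ≤ (ws.length : Int)) → cs.Pairwise (· ≤ ·) →
      (pages.foldl (fun (st : List String × List Int) page =>
          (st.1 ++ PySem.Str.split₀ page,
           st.2 ++ [((st.1 ++ PySem.Str.split₀ page).length : Int)])) (ws, cs)).2.Pairwise (· ≤ ·) := by
  intro ws cs
  induction pages generalizing ws cs with
  | nil => intro _ hp; simpa using hp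
  | cons p t ih =>
    intro hbd hp
    simp only [List.foldl_cons]
    apply ih
    · intro x hx
      rcases List.mem_append.mp hx with hx | hx
      · have h1 := hbd x hx
        have h2 : (ws ++ PySem.Str.split₀ p).length = ws.length + (PySem.Str.split₀ p).length :=
          List.length_append
        omega
      · simp only [List.mem_singleton] at hx; omega
    · rw [List.pairwise_append]
      refine ⟨hp, by simp, ?_⟩
      intro x hx y hy
      simp at hy; subst hy
      have h1 := hbd x hx
      have h2 : (ws ++ PySem.Str.split₀ p).length = ws.length + (PySem.Str.split₀ p).length :=
        List.length_append
      omega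

-- ===== VERDICT (by name: the statement is the Claim_ definition above) =====
theorem make_pages_chunks_spec : Claim_equal_make_pages_chunks := by
  unfold Claim_equal_make_pages_chunks
  intro pages c s hdom hpre
  unfold Spec_make_pages_chunks
  obtain ⟨hne, hcond⟩ := hpre
  have hsorted := pv_fold_sorted pages [] [] (by simp) (by simp)
  have h12 := pv_fold_eq pages [] []
  simp only [List.length_nil, Nat.cast_zero, List.nil_append] at h12 hsorted
  obtain ⟨hcs, hws⟩ := h12
  simp only [make_pages_chunks, make_pages_chunks_alt]
  rw [hcs, hws]
  apply pv_loop_eq _ _ c s hsorted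
  · rcases hcond with h | h
    · exact Or.inl h
    · exact Or.inr h
  · omega
  · simp
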